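-- pv_equiv track=rewrite | github.com/kootru-repo/kstar-verify | lean4/scripts/generate_verification_manifest.py | classify_axioms
-- ===== SOURCE A (Python) =====
-- LEAN_CORE_AXIOMS = {"propext", "Classical.choice", "Quot.sound"}
--
-- NAMED_PROPOSITIONAL_AXIOMS = {
--     "witness_states_are_valid": "Nielsen & Chuang (Sec. 2.4)",
--     "fidelity_orthogonal_zero": "Uhlmann 1976",
--     "fidelity_witness_traceproj_decomp": "Fuchs & van de Graaf 1999",
--     "fidelity_nonneg": "definition",
--     "weyl_eigenvalue_bound": "Bhatia, Matrix Analysis, Thm III.2.1",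
-- }
--
-- def classify_axioms(axioms: list[str]) -> dict:
--     """Partition axioms into core / named / native_decide / other."""
--     core = [a for a in axioms if a in LEAN_CORE_AXIOMS]
--     named = [a for a in axioms if a in NAMED_PROPOSITIONAL_AXIOMS]
--     native = [a for a in axioms if "._native.native_decide.ax_" in a]
--     known = set(core) | set(named) | set(native)
--     other = [a for a in axioms if a not in known]
--     return {
--         "core": core,
--         "named_propositional": named,
--         "native_decide_certificates": native,
--         "other_declarations": other,
--     }
-- ===== SOURCE B (Python) =====
-- LEAN_CORE_AXIOMS = {"propext", "Classical.choice", "Quot.sound"}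
--
-- NAMED_PROPOSITIONAL_AXIOMS = {
--     "witness_states_are_valid": "Nielsen & Chuang (Sec. 2.4)",
--     "fidelity_orthogonal_zero": "Uhlmann 1976",
--     "fidelity_witness_traceproj_decomp": "Fuchs & van de Graaf 1999",
--     "fidelity_nonneg": "definition",
--     "weyl_eigenvalue_bound": "Bhatia, Matrix Analysis, Thm III.2.1",
-- }
--
-- def classify_axioms(axioms: list[str]) -> dict:
--     """Partition axioms into core / named / native_decide / other in one pass."""
--     core, named, native, other = [], [], [], []
--     for a in axioms:
--         if a in LEAN_CORE_AXIOMS: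
--             core.append(a)
--         elif a in NAMED_PROPOSITIONAL_AXIOMS:
--             named.append(a)
--         elif "._native.native_decide.ax_" in a:
--             native.append(a)
--         else:
--             other.append(a)
--     return {
--         "core": core,
--         "named_propositional": named,
--         "native_decide_certificates": native,
--         "other_declarations": other,
--     }
-- ===== Notes on version B (the rewrite author's own statement) =====
-- stated objective: simpler
-- what changed: Replaces A's four separate filtering passes (plus an intermediate 'known' set) with a single pass over the axioms dispatching each element into one of four buckets via an if/elif/else chain; this is valid because the three category tests are mutually exclusive on every string.
import Mathlib
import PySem

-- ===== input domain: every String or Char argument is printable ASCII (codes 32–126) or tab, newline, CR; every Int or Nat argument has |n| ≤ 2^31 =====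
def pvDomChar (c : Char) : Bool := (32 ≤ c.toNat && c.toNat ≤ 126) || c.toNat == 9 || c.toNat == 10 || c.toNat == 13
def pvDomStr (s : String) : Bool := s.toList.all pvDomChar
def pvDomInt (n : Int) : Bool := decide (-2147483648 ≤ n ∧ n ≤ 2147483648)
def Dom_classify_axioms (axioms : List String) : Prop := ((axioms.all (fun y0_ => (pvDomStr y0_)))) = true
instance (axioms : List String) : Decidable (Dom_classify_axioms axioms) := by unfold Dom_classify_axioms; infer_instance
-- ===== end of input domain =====

-- B replaces A's four separate filtering passes (plus the intermediate 'known' set)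
-- with ONE pass dispatching each axiom into a bucket via an if/elif/else chain (objective: simpler).

-- ===== PORT A =====
def pvCoreSet : PySem.Set String := PySem.Set.ofList ["propext", "Classical.choice", "Quot.sound"]

def pvNamedDict : PySem.Dict String String := PySem.Dict.ofList
  [("witness_states_are_valid", "Nielsen & Chuang (Sec. 2.4)"),
   ("fidelity_orthogonal_zero", "Uhlmann 1976"),
   ("fidelity_witness_traceproj_decomp", "Fuchs & van de Graaf 1999"),
   ("fidelity_nonneg", "definition"),
   ("weyl_eigenvalue_bound", "Bhatia, Matrix Analysis, Thm III.2.1")]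

def pvNativeSub : String := "._native.native_decide.ax_"

def classify_axioms (axioms : List String) : List (String × List String) :=
  let core := axioms.filter (fun a => PySem.Set.contains pvCoreSet a)
  let named := axioms.filter (fun a => pvNamedDict.contains a)
  let native := axioms.filter (fun a => PySem.Str.isIn pvNativeSub a)
  let known := PySem.Set.union (PySem.Set.union (PySem.Set.ofList core) (PySem.Set.ofList named)) native
  let other := axioms.filter (fun a => ! PySem.Set.contains known a)
  [("core", core), ("named_propositional", named),
   ("native_decide_certificates", native), ("other_declarations", other)]

-- ===== PORT B =====
-- one pass: each axiom goes into exactly one of the four buckets (if/elif/else)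
def pvClassGo : List String → List String × List String × List String × List String
  | [] => ([], [], [], [])
  | a :: rest =>
    let (c, n, nt, o) := pvClassGo rest
    if PySem.Set.contains pvCoreSet a then (a :: c, n, nt, o)
    else if pvNamedDict.contains a then (c, a :: n, nt, o)
    else if PySem.Str.isIn pvNativeSub a then (c, n, a :: nt, o)
    else (c, n, nt, a :: o)

def classify_axioms_alt (axioms : List String) : List (String × List String) :=
  let (core, named, native, other) := pvClassGo axioms
  [("core", core), ("named_propositional", named),
   ("native_decide_certificates", native), ("other_declarations", other)]

-- ===== PRECONDITION & SPEC =====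
def Spec_classify_axioms (axioms : List String) (out : List (String × List String)) : Prop := out = classify_axioms_alt axioms
instance (axioms : List String) (out : List (String × List String)) : Decidable (Spec_classify_axioms axioms out) := by unfold Spec_classify_axioms; infer_instance

-- ===== CLAIM (what is proved, stated in full; the proofs are below) =====
def Claim_equal_classify_axioms : Prop := ∀ (axioms : List String), Dom_classify_axioms axioms → Spec_classify_axioms axioms (classify_axioms axioms)

-- ===== LEMMAS AND PROOFS =====

-- the three category tests are mutually exclusive on EVERY string
theorem pv_core_not_named {a : String} (h : PySem.Set.contains pvCoreSet a = true) :
    pvNamedDict.contains a = false := by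
  rw [PySem.Set.contains_iff] at h
  simp only [pvCoreSet, PySem.Set.mem_ofList, List.mem_cons, List.not_mem_nil, or_false] at h
  rcases h with h | h | h <;> subst h <;> decide

theorem pv_core_not_native {a : String} (h : PySem.Set.contains pvCoreSet a = true) :
    PySem.Str.isIn pvNativeSub a = false := by
  rw [PySem.Set.contains_iff] at h
  simp only [pvCoreSet, PySem.Set.mem_ofList, List.mem_cons, List.not_mem_nil, or_false] at h
  rcases h with h | h | h <;> subst h <;> decide

theorem pv_named_not_native {a : String} (h : pvNamedDict.contains a = true) :
    PySem.Str.isIn pvNativeSub a = false := by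
  rw [PySem.Dict.contains_iff_mem_keys] at h
  have hk : pvNamedDict.keys = ["witness_states_are_valid", "fidelity_orthogonal_zero",
      "fidelity_witness_traceproj_decomp", "fidelity_nonneg", "weyl_eigenvalue_bound"] := by rfl
  rw [hk] at h
  simp only [List.mem_cons, List.not_mem_nil, or_false] at h
  rcases h with h | h | h | h | h <;> subst h <;> decide

-- B's single pass computes the four filters
theorem pvClassGo_eq (xs : List String) :
    pvClassGo xs =
      (xs.filter (fun a => PySem.Set.contains pvCoreSet a),
       xs.filter (fun a => pvNamedDict.contains a),
       xs.filter (fun a => PySem.Str.isIn pvNativeSub a),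
       xs.filter (fun a => !(PySem.Set.contains pvCoreSet a || pvNamedDict.contains a ||
                             PySem.Str.isIn pvNativeSub a))) := by
  induction xs with
  | nil => rfl
  | cons a rest ih =>
    by_cases hc : PySem.Set.contains pvCoreSet a = true
    · have hm : a ∈ pvCoreSet := (PySem.Set.contains_iff _ _).mp hc
      have h1 := pv_core_not_named hc
      have h2 := pv_core_not_native hc
      simp at h2
      simp [pvClassGo, ih, List.filter_cons, hm, h1, h2]
    · rw [Bool.not_eq_true] at hc
      have hm : a ∉ pvCoreSet := fun hmem => by
        rw [← PySem.Set.contains_iff _ _, hc] at hmem; exact Bool.false_ne_true hmem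
      by_cases hn : pvNamedDict.contains a = true
      · have h2 := pv_named_not_native hn
        simp at h2
        simp [pvClassGo, ih, List.filter_cons, hm, hn, h2]
      · rw [Bool.not_eq_true] at hn
        by_cases ht : PySem.Str.isIn pvNativeSub a = true
        · have ht' := ht; simp at ht'
          simp [pvClassGo, ih, List.filter_cons, hm, hn, ht']
        · rw [Bool.not_eq_true] at ht
          have ht' := ht; simp at ht'
          simp [pvClassGo, ih, List.filter_cons, hm, hn, ht']

theorem pv_known_contains (axioms : List String) (a : String) (ha : a ∈ axioms) :
    PySem.Set.contains
      (PySem.Set.union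
        (PySem.Set.union
          (PySem.Set.ofList (axioms.filter (fun a => PySem.Set.contains pvCoreSet a)))
          (PySem.Set.ofList (axioms.filter (fun a => pvNamedDict.contains a))))
        (axioms.filter (fun a => PySem.Str.isIn pvNativeSub a))) a =
    (PySem.Set.contains pvCoreSet a || pvNamedDict.contains a || PySem.Str.isIn pvNativeSub a) := by
  rcases Bool.eq_false_or_eq_true (PySem.Set.contains pvCoreSet a ||
      pvNamedDict.contains a || PySem.Str.isIn pvNativeSub a) with h | h <;> rw [h]
  · rw [PySem.Set.contains_iff]
    simp only [PySem.Set.mem_union, PySem.Set.mem_ofList, List.mem_filter]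
    rw [Bool.or_eq_true, Bool.or_eq_true] at h
    rcases h with (h | h) | h
    · exact Or.inl (Or.inl ⟨ha, h⟩)
    · exact Or.inl (Or.inr ⟨ha, h⟩)
    · exact Or.inr ⟨ha, h⟩
  · rw [Bool.eq_false_iff, Ne, PySem.Set.contains_iff]
    simp only [PySem.Set.mem_union, PySem.Set.mem_ofList, List.mem_filter]
    rw [Bool.or_eq_false_iff, Bool.or_eq_false_iff] at h
    obtain ⟨⟨h1, h2⟩, h3⟩ := h
    have h3' := h3; simp at h3'
    have h1' : a ∉ pvCoreSet := fun hm => by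
      rw [← PySem.Set.contains_iff _ _, h1] at hm; exact Bool.false_ne_true hm
    simp [h1', h2, h3']

-- ===== VERDICT (by name: the statement is the Claim_ definition above) =====
theorem classify_axioms_spec : Claim_equal_classify_axioms := by
  intro axioms _
  unfold Spec_classify_axioms classify_axioms classify_axioms_alt
  rw [pvClassGo_eq]
  simp only []
  have hother :
      axioms.filter (fun a => ! PySem.Set.contains
        (PySem.Set.union
          (PySem.Set.union
            (PySem.Set.ofList (axioms.filter (fun a => PySem.Set.contains pvCoreSet a)))
            (PySem.Set.ofList (axioms.filter (fun a => pvNamedDict.contains a))))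
          (axioms.filter (fun a => PySem.Str.isIn pvNativeSub a))) a) =
      axioms.filter (fun a => !(PySem.Set.contains pvCoreSet a || pvNamedDict.contains a ||
                                PySem.Str.isIn pvNativeSub a)) := by
    apply List.filter_congr
    intro a ha
    rw [pv_known_contains axioms a ha]
  rw [hother]
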